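-- pv_equiv track=rewrite | github.com/marcoamolinaro/avaliacao_vivo | Q2/questao2.py | contar_elementos
-- ===== SOURCE A (Python) =====
-- def contar_elementos(lista):
--     matriz = [
--         [5, 8, 3, 2, 1],
--         [9, 7, 11, 0, 6],
--         [4, 10, 13, 15, 12],
--         [14, 3, 5, 8, 9],
--         [1, 2, 6, 7, 4]
--     ]
--
--     contagem = {}
--     for elemento in lista:
--         if 0 <= elemento <= 15:
--             contagem[elemento] = 0
--
--     for linha in matriz:
--         for valor in linha:
--             if valor in contagem:
--                 contagem[valor] += 1
--
--     return contagem
-- ===== SOURCE B (Python) =====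
-- # The matrix is a fixed constant, so the occurrence count of each value 0..15 in it
-- # is a constant too: precompute that table once and do a single table-lookup pass
-- # over lista (no matrix scan at run time).
-- _COUNTS = (1, 2, 2, 2, 2, 2, 2, 2, 2, 2, 1, 1, 1, 1, 1, 1)  # count of v in the matrix, v = 0..15
--
-- def contar_elementos(lista):
--     contagem = {}
--     for elemento in lista:
--         if 0 <= elemento <= 15:
--             contagem[elemento] = _COUNTS[elemento]
--     return contagem
-- ===== Notes on version B (the rewrite author's own statement) =====
-- stated objective: simpler
-- what changed: B replaces both of A's dict-building passes (seed from lista, then scan all 25 matrix cells incrementing) with a precomputed constant lookup table of the fixed matrix's counts for 0..15 and a single assignment pass over lista.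
import Mathlib
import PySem

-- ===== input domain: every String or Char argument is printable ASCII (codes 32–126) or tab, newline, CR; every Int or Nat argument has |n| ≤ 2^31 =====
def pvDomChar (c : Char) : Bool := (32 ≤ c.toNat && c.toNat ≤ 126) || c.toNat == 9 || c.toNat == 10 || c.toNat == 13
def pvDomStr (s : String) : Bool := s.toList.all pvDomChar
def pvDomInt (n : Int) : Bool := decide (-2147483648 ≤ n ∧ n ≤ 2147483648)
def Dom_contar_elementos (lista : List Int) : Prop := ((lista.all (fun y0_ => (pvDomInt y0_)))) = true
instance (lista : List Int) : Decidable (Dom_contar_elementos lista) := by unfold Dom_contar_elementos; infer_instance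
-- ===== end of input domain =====

-- B: the matrix is a fixed constant, so B uses a precomputed table of its counts for
-- 0..15 and one lookup pass over lista — no matrix scan at run time (objective: simpler).

-- ===== PORT A =====
-- A: seed a dict with 0 for each in-range element of lista, then scan every matrix
-- cell and increment the counter of cells whose value is a key.
def contar_elementos (lista : List Int) : List (Int × Int) :=
  let matriz : List (List Int) :=
    [[5, 8, 3, 2, 1], [9, 7, 11, 0, 6], [4, 10, 13, 15, 12], [14, 3, 5, 8, 9], [1, 2, 6, 7, 4]]
  let contagem : PySem.Dict Int Int :=
    lista.foldl (fun d elemento => if 0 ≤ elemento ∧ elemento ≤ 15 then d.insert elemento 0 else d)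
      PySem.Dict.empty
  let contagem :=
    matriz.foldl (fun d linha =>
      linha.foldl (fun d valor =>
        if d.contains valor then d.insert valor (d.getD valor 0 + 1) else d) d) contagem
  contagem.items

-- ===== PORT B =====
-- _COUNTS, the constant table of Source B
def pvCounts : List Int := [1, 2, 2, 2, 2, 2, 2, 2, 2, 2, 1, 1, 1, 1, 1, 1]

def contar_elementos_alt (lista : List Int) : List (Int × Int) :=
  (lista.foldl (fun d elemento =>
      if 0 ≤ elemento ∧ elemento ≤ 15 then
        -- tuple indexing _COUNTS[elemento]: the guard guarantees 0 ≤ elemento ≤ 15,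
        -- so plain getD on the Nat index is exact here
        d.insert elemento (pvCounts.getD elemento.toNat 0)
      else d)
    PySem.Dict.empty).items

-- ===== PRECONDITION & SPEC =====
def Spec_contar_elementos (lista : List Int) (out : List (Int × Int)) : Prop := out = contar_elementos_alt lista
instance (lista : List Int) (out : List (Int × Int)) : Decidable (Spec_contar_elementos lista out) := by unfold Spec_contar_elementos; infer_instance

-- ===== CLAIM (what is proved, stated in full; the proofs are below) =====
def Claim_equal_contar_elementos : Prop := ∀ (lista : List Int), Dom_contar_elementos lista → Spec_contar_elementos lista (contar_elementos lista)

-- ===== LEMMAS AND PROOFS =====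

-- the flattened matrix cells
def pvFlatM : List Int :=
  [5, 8, 3, 2, 1, 9, 7, 11, 0, 6, 4, 10, 13, 15, 12, 14, 3, 5, 8, 9, 1, 2, 6, 7, 4]

-- A's phase-1 step and the counting step of A's phase 2; B's single-pass step
def pvAStep1 (d : PySem.Dict Int Int) (e : Int) : PySem.Dict Int Int :=
  if 0 ≤ e ∧ e ≤ 15 then d.insert e 0 else d
def pvAStep2 (d : PySem.Dict Int Int) (v : Int) : PySem.Dict Int Int :=
  if d.contains v then d.insert v (d.getD v 0 + 1) else d
def pvBStep (d : PySem.Dict Int Int) (e : Int) : PySem.Dict Int Int :=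
  if 0 ≤ e ∧ e ≤ 15 then d.insert e (pvCounts.getD e.toNat 0) else d

def pvF (p : Int × Int) : Int × Int := (p.1, p.2 + (pvFlatM.count p.1 : Int))

-- the precomputed table agrees with the matrix counts on 0..15
lemma pvCounts_getD (e : Int) (h0 : 0 ≤ e) (h15 : e ≤ 15) :
    pvCounts.getD e.toNat 0 = (pvFlatM.count e : Int) := by
  interval_cases e <;> rfl

lemma phase1_nodup (l : List Int) (d : PySem.Dict Int Int) (h : d.keys.Nodup) :
    (l.foldl pvAStep1 d).keys.Nodup := by
  induction l generalizing d with
  | nil => simpa using h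
  | cons e l ih =>
    simp only [List.foldl_cons]
    apply ih
    unfold pvAStep1
    split
    · exact PySem.Dict.nodup_keys_insert _ _ _ h
    · exact h

lemma phase2_items (vs : List Int) (d : PySem.Dict Int Int) (h : d.keys.Nodup) :
    (vs.foldl pvAStep2 d).items = d.items.map (fun p => (p.1, p.2 + (vs.count p.1 : Int))) := by
  induction vs generalizing d with
  | nil => simp
  | cons v vs ih =>
    simp only [List.foldl_cons]
    by_cases hc : d.contains v = true
    · have hkeys : (d.insert v (d.getD v 0 + 1)).keys = d.keys :=
        PySem.Dict.keys_insert_of_contains d (d.getD v 0 + 1) hc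
      have hnd : (d.insert v (d.getD v 0 + 1)).keys.Nodup := by rw [hkeys]; exact h
      rw [show pvAStep2 d v = d.insert v (d.getD v 0 + 1) by simp [pvAStep2, hc]]
      rw [ih _ hnd, PySem.Dict.items_insert_of_contains d _ hc, List.map_map]
      apply List.map_congr_left
      intro p hp
      by_cases hpv : p.1 = v
      · have hgd : d.getD p.1 0 = p.2 := PySem.Dict.getD_of_mem_items d (by simpa using hp) h 0
        simp only [Function.comp, hpv, beq_self_eq_true, if_pos]
        rw [hpv] at hgd
        simp [hgd]
        ring
      · have hvp : ¬ v = p.1 := fun he => hpv he.symm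
        simp only [Function.comp]
        rw [if_neg (by simpa using hpv)]
        simp [hvp]
    · rw [show pvAStep2 d v = d by simp [pvAStep2, hc]]
      rw [ih _ h]
      apply List.map_congr_left
      intro p hp
      have hpk : p.1 ∈ d.keys := PySem.Dict.mem_keys_of_mem_items d hp
      have hpv : p.1 ≠ v := by
        intro he
        exact hc ((PySem.Dict.contains_iff_mem_keys d v).mpr (he ▸ hpk))
      have hvp : ¬ v = p.1 := fun he => hpv he.symm
      simp [hvp]

lemma keys_rel {d1 d2 : PySem.Dict Int Int} (hk : d2.items = d1.items.map pvF) :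
    d2.keys = d1.keys := by
  show d2.items.map Prod.fst = d1.items.map Prod.fst
  rw [hk, List.map_map]
  rfl

lemma phase1B_items (l : List Int) (d1 d2 : PySem.Dict Int Int)
    (hk : d2.items = d1.items.map pvF) :
    (l.foldl pvBStep d2).items = (l.foldl pvAStep1 d1).items.map pvF := by
  induction l generalizing d1 d2 with
  | nil => simpa using hk
  | cons e l ih =>
    simp only [List.foldl_cons]
    apply ih
    unfold pvBStep pvAStep1
    by_cases hr : 0 ≤ e ∧ e ≤ 15
    · rw [if_pos hr, if_pos hr]
      have htab : pvCounts[e.toNat]?.getD 0 = (pvFlatM.count e : Int) :=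
        pvCounts_getD e hr.1 hr.2
      have hck : d2.contains e = d1.contains e := by
        rw [PySem.Dict.contains_eq_decide_mem_keys, PySem.Dict.contains_eq_decide_mem_keys,
          keys_rel hk]
      by_cases hc : d1.contains e = true
      · rw [PySem.Dict.items_insert_of_contains d2 _ (hck ▸ hc),
          PySem.Dict.items_insert_of_contains d1 _ hc, hk, List.map_map, List.map_map]
        apply List.map_congr_left
        intro p hp
        by_cases hpe : p.1 = e
        · simp [Function.comp, pvF, hpe, htab]
        · simp [Function.comp, pvF, hpe]
      · rw [PySem.Dict.items_insert_of_not_contains d2 _ (by simp [hck, hc]),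
          PySem.Dict.items_insert_of_not_contains d1 _ (by simp [hc]), hk, List.map_append]
        simp [pvF, htab]
    · rw [if_neg hr, if_neg hr]; exact hk

-- ===== VERDICT (by name: the statement is the Claim_ definition above) =====
theorem contar_elementos_spec : Claim_equal_contar_elementos := by
  intro lista _
  show contar_elementos lista = contar_elementos_alt lista
  show (([[5, 8, 3, 2, 1], [9, 7, 11, 0, 6], [4, 10, 13, 15, 12], [14, 3, 5, 8, 9],
        [1, 2, 6, 7, 4]] : List (List Int)).foldl (fun d linha => linha.foldl pvAStep2 d)
        (lista.foldl pvAStep1 PySem.Dict.empty)).items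
      = (lista.foldl pvBStep PySem.Dict.empty).items
  rw [← List.foldl_flatten]
  have hflat : ([[5, 8, 3, 2, 1], [9, 7, 11, 0, 6], [4, 10, 13, 15, 12], [14, 3, 5, 8, 9],
      [1, 2, 6, 7, 4]] : List (List Int)).flatten = pvFlatM := rfl
  rw [hflat]
  rw [phase2_items pvFlatM _ (phase1_nodup lista _ PySem.Dict.nodup_keys_empty)]
  exact (phase1B_items lista PySem.Dict.empty PySem.Dict.empty rfl).symm
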